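-- pv_equiv track=rewrite | github.com/Retro788/Data_Structure | tareaTeams1.py | contar_mayores_50
-- ===== SOURCE A (Python) =====
-- def contar_mayores_50(matriz, fila=0, col=0, count=0):
--     if fila >= len(matriz):
--         return count
--     if col >= len(matriz[0]):
--         return contar_mayores_50(matriz, fila + 1, 0, count)
--     if matriz[fila][col] > 50:
--         count += 1
--     return contar_mayores_50(matriz, fila, col + 1, count)
-- ===== SOURCE B (Python) =====
-- def contar_mayores_50(matriz, fila=0, col=0, count=0):
--     total = count
--     for f in range(fila, len(matriz)):
--         ncols = len(matriz[0])
--         start = col if f == fila else 0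
--         for c in range(start, ncols):
--             if matriz[f][c] > 50:
--                 total += 1
--     return total
-- ===== Notes on version B (the rewrite author's own statement) =====
-- stated objective: simpler
-- what changed: Replaces A's cell-by-cell tail recursion (one call per cell plus one per row) with two nested for-loops over ranges and a plain accumulator, keeping the partial-first-row start at col and the added count.
import Mathlib
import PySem

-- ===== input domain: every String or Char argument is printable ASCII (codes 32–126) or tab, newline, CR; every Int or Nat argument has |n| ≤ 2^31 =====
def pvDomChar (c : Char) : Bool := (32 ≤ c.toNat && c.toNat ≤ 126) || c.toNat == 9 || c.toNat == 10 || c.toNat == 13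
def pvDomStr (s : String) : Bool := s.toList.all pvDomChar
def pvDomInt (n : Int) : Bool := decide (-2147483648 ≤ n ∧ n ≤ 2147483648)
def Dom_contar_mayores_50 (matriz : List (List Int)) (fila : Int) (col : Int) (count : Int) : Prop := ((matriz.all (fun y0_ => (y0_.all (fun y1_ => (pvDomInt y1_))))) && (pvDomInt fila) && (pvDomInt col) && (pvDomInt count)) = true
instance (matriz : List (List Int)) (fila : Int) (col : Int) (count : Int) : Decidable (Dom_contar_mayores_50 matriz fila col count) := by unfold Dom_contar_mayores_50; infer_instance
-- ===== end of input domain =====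

-- B replaces A's cell-by-cell recursion by two nested for-loops with an accumulator (objective: simpler, iteration instead of recursion).

-- ===== PORT A =====
-- matriz[0] is len(matriz[0]); matriz[fila][col] via pyGet?; '.getD' defaults fire only
-- where Python raises IndexError, which Pre_ excludes.
def contar_mayores_50 (matriz : List (List Int)) (fila : Int) (col : Int) (count : Int) : Int :=
  if _h1 : fila ≥ (matriz.length : Int) then count
  else if _h2 : col ≥ (((matriz.headD []).length : Int)) then
    contar_mayores_50 matriz (fila + 1) 0 count
  else
    contar_mayores_50 matriz fila (col + 1)
      (if (PySem.List.pyGet? ((PySem.List.pyGet? matriz fila).getD []) col).getD 0 > 50 then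
        count + 1
      else count)
termination_by (((matriz.length : Int) - fila).toNat, ((((matriz.headD []).length : Int)) - col).toNat)
decreasing_by
  · left; omega
  · right; omega

-- ===== PORT B =====
def contar_mayores_50_alt (matriz : List (List Int)) (fila : Int) (col : Int) (count : Int) : Int :=
  (PySem.List.pyRange fila (matriz.length : Int) 1).foldl
    (fun total f =>
      (PySem.List.pyRange (if f = fila then col else 0) (((matriz.headD []).length : Int)) 1).foldl
        (fun t c =>
          if (PySem.List.pyGet? ((PySem.List.pyGet? matriz f).getD []) c).getD 0 > 50 then t + 1
          else t)
        total)
    count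

-- ===== PRECONDITION & SPEC =====
-- Pre_ excludes exactly the inputs on which the Python A raises IndexError (an out-of-range
-- row or cell access, including matriz[0] on an empty matriz reached when fila < 0).
def Pre_contar_mayores_50 (matriz : List (List Int)) (fila : Int) (col : Int) (count : Int) : Prop :=
  fila ≥ (matriz.length : Int) ∨
  ( matriz ≠ [] ∧
    (let L : Int := matriz.length
     let nc : Int := (matriz.headD []).length
     let rowsAfter := if fila + 1 ≤ 0 then matriz else matriz.drop (fila + 1).toNat
     if col < nc then
       -L ≤ fila ∧
       -(((PySem.List.pyGet? matriz fila).getD []).length : Int) ≤ col ∧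
       (0 < nc → nc ≤ (((PySem.List.pyGet? matriz fila).getD []).length : Int)) ∧
       (0 < nc → ∀ r ∈ rowsAfter, nc ≤ (r.length : Int))
     else
       (0 < nc → (-L ≤ fila + 1 ∧ ∀ r ∈ rowsAfter, nc ≤ (r.length : Int)))))

instance (matriz : List (List Int)) (fila : Int) (col : Int) (count : Int) : Decidable (Pre_contar_mayores_50 matriz fila col count) := by unfold Pre_contar_mayores_50; infer_instance

def pvWitness_contar_mayores_50 : List (List Int) × Int × Int × Int := ([[60, 1], [51, 99]], 0, 0, 0)

def Spec_contar_mayores_50 (matriz : List (List Int)) (fila : Int) (col : Int) (count : Int) (out : Int) : Prop := out = contar_mayores_50_alt matriz fila col count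
instance (matriz : List (List Int)) (fila : Int) (col : Int) (count : Int) (out : Int) : Decidable (Spec_contar_mayores_50 matriz fila col count out) := by unfold Spec_contar_mayores_50; infer_instance

-- ===== CLAIM (what is proved, stated in full; the proofs are below) =====
def Claim_equal_contar_mayores_50 : Prop := ∀ (matriz : List (List Int)) (fila : Int) (col : Int) (count : Int), Dom_contar_mayores_50 matriz fila col count → Pre_contar_mayores_50 matriz fila col count → Spec_contar_mayores_50 matriz fila col count (contar_mayores_50 matriz fila col count)

-- ===== LEMMAS AND PROOFS =====

theorem alt_skip (matriz : List (List Int)) (fila col count : Int)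
    (h1 : fila < (matriz.length : Int)) (h2 : ((matriz.headD []).length : Int) ≤ col) :
    contar_mayores_50_alt matriz fila col count = contar_mayores_50_alt matriz (fila + 1) 0 count := by
  unfold contar_mayores_50_alt
  rw [PySem.List.pyRange_one_cons h1]
  simp only [List.foldl_cons, if_true]
  rw [PySem.List.pyRange_one_eq_nil h2]
  simp only [List.foldl_nil]
  apply PySem.List.foldl_congr_mem
  intro acc x hx
  have hxm := (PySem.List.mem_pyRange_one).mp hx
  have hne : x ≠ fila := by omega
  simp [hne]

theorem alt_cell (matriz : List (List Int)) (fila col count : Int)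
    (h1 : fila < (matriz.length : Int)) (h2 : col < ((matriz.headD []).length : Int)) :
    contar_mayores_50_alt matriz fila col count =
      contar_mayores_50_alt matriz fila (col + 1)
        (if (PySem.List.pyGet? ((PySem.List.pyGet? matriz fila).getD []) col).getD 0 > 50 then
          count + 1
        else count) := by
  unfold contar_mayores_50_alt
  rw [PySem.List.pyRange_one_cons h1]
  simp only [List.foldl_cons, if_true]
  rw [PySem.List.pyRange_one_cons h2]
  simp only [List.foldl_cons]
  apply PySem.List.foldl_congr_mem
  intro acc x hx
  have hxm := (PySem.List.mem_pyRange_one).mp hx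
  have hne : x ≠ fila := by omega
  simp [hne]

-- A equals B on every input (Pre_ is only needed for faithfulness to the raising Python runs).
theorem contar_eq_alt (matriz : List (List Int)) (fila col count : Int) :
    contar_mayores_50 matriz fila col count = contar_mayores_50_alt matriz fila col count := by
  fun_induction contar_mayores_50 matriz fila col count with
  | case1 fila col count h1 =>
      unfold contar_mayores_50_alt
      rw [PySem.List.pyRange_one_eq_nil (by omega)]
      rfl
  | case2 fila col count h1 h2 ih =>
      rw [ih]
      exact (alt_skip matriz fila col count (by omega) (by omega)).symm
  | case3 fila col count h1 h2 ih =>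
      simp only [dite_eq_ite] at ih
      rw [ih]
      exact (alt_cell matriz fila col count (by omega) (by omega)).symm

-- ===== VERDICT (by name: the statement is the Claim_ definition above) =====
theorem contar_mayores_50_spec : Claim_equal_contar_mayores_50 := by
  intro matriz fila col count _ _
  exact contar_eq_alt matriz fila col count
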